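-- pv_equiv track=rewrite | github.com/rzkyalbani/sbox-tester | backend/affine_generator.py | affine_transform
-- ===== SOURCE A (Python) =====
-- def affine_transform(x, matrix_value, additive_constant):
--     """
--     Apply affine transformation to a byte.
--
--     Args:
--         x: Input byte (0-255)
--         matrix_value: 8-bit matrix representation
--         additive_constant: Constant to add (0-255)
--
--     Returns:
--         Transformed byte (0-255)
--     """
--     result = 0
--
--     # Apply matrix transformation
--     # Each output bit is XOR of selected input bits based on matrix
--     for i in range(8):
--         bit = 0
--         for j in range(8):
--             # Check if bit j of matrix row i is set
--             if (matrix_value >> ((i + j) % 8)) & 1: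
--                 bit ^= (x >> j) & 1
--         result |= (bit << i)
--
--     # Add constant (XOR in GF(2))
--     return result ^ additive_constant
-- ===== SOURCE B (Python) =====
-- def affine_transform(x, matrix_value, additive_constant):
--     # Row i of the matrix is matrix_value rotated right by i (index (i+j)%8),
--     # so output bit i is the parity of (x & 0xFF) AND that rotated mask.
--     m = matrix_value & 0xFF
--     xb = x & 0xFF
--     result = 0
--     for i in range(8):
--         mask = ((m >> i) | (m << (8 - i))) & 0xFF
--         p = xb & mask
--         p ^= p >> 4
--         p ^= p >> 2
--         p ^= p >> 1
--         result |= (p & 1) << i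
--     return result ^ additive_constant
-- ===== Notes on version B (the rewrite author's own statement) =====
-- stated objective: faster
-- what changed: Replaces the 8x8 nested per-bit XOR scan with 8 iterations that each AND the input byte with an 8-bit rotation of matrix_value and reduce it to a parity bit by an xor-shift fold.
import Mathlib
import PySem

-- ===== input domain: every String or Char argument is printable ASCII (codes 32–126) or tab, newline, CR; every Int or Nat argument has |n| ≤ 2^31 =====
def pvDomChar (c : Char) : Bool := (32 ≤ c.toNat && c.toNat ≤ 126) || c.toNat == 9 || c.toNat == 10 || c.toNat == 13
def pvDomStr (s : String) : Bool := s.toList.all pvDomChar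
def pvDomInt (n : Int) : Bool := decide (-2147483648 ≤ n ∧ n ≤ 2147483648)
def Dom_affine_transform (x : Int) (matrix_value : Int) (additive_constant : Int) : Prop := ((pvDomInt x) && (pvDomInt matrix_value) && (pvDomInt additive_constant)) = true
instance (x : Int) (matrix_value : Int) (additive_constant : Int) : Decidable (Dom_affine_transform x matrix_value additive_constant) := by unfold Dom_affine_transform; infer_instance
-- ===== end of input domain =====

-- B replaces A's 8×8 nested bit-by-bit XOR scan by 8 parity reductions of (x & rotated mask); alternative algorithm, same exact values.

-- ===== PORT A =====
-- A-side helper: the value of `result` after the double loop (before the final XOR with the constant).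
def affineALoop (x matrix_value : Int) : Int :=
  (PySem.List.pyRange 0 8).foldl (fun result i =>
    PySem.Int.bor result
      (((PySem.List.pyRange 0 8).foldl (fun bit j =>
          if PySem.Int.band (matrix_value >>> (PySem.Int.mod (i + j) 8).toNat) 1 ≠ 0 then
            PySem.Int.bxor bit (PySem.Int.band (x >>> j.toNat) 1)
          else bit) 0) <<< i.toNat)) 0

def affine_transform (x : Int) (matrix_value : Int) (additive_constant : Int) : Int :=
  PySem.Int.bxor (affineALoop x matrix_value) additive_constant

-- ===== PORT B =====
-- B-side helper: the loop over the 8 output bits, given xb = x & 0xFF and m = matrix_value & 0xFF.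
def affineAltLoop (xb m : Int) : Int :=
  (PySem.List.pyRange 0 8).foldl (fun result i =>
    let mask := PySem.Int.band (PySem.Int.bor (m >>> i.toNat) (m <<< (8 - i).toNat)) 255
    let p0 := PySem.Int.band xb mask
    let p1 := PySem.Int.bxor p0 (p0 >>> 4)
    let p2 := PySem.Int.bxor p1 (p1 >>> 2)
    let p3 := PySem.Int.bxor p2 (p2 >>> 1)
    PySem.Int.bor result (PySem.Int.band p3 1 <<< i.toNat)) 0

def affine_transform_alt (x : Int) (matrix_value : Int) (additive_constant : Int) : Int :=
  PySem.Int.bxor (affineAltLoop (PySem.Int.band x 255) (PySem.Int.band matrix_value 255)) additive_constant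

-- ===== PRECONDITION & SPEC =====
def Spec_affine_transform (x : Int) (matrix_value : Int) (additive_constant : Int) (out : Int) : Prop := out = affine_transform_alt x matrix_value additive_constant
instance (x : Int) (matrix_value : Int) (additive_constant : Int) (out : Int) : Decidable (Spec_affine_transform x matrix_value additive_constant out) := by unfold Spec_affine_transform; infer_instance

-- ===== CLAIM (what is proved, stated in full; the proofs are below) =====
def Claim_equal_affine_transform : Prop := ∀ (x : Int) (matrix_value : Int) (additive_constant : Int), Dom_affine_transform x matrix_value additive_constant → Spec_affine_transform x matrix_value additive_constant (affine_transform x matrix_value additive_constant)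

-- ===== LEMMAS AND PROOFS =====

-- Bit k (k < 8) of y, as A reads it, only depends on y mod 256.
theorem pv_shift_band_one_mod (y : Int) (k : Nat) (hk : k < 8) :
    PySem.Int.band (y >>> k) 1 = PySem.Int.band ((y % 256) >>> k) 1 := by
  rw [PySem.Int.band_one, PySem.Int.band_one,
      PySem.Int.mod_eq_emod_of_pos (by norm_num), PySem.Int.mod_eq_emod_of_pos (by norm_num),
      Int.shiftRight_eq_div_pow, Int.shiftRight_eq_div_pow]
  interval_cases k <;> (norm_num; (try omega))

-- Python's y & 0xFF is y mod 256 (also for negative y).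
theorem pv_band_255 (y : Int) : PySem.Int.band y 255 = y % 256 := by
  have h8 : ∀ n : Nat, n &&& 255 = n % 256 := by
    intro n
    have := Nat.and_two_pow_sub_one_eq_mod n 8
    norm_num at this
    exact this
  have h255 : Int.toNat 255 = 255 := rfl
  unfold PySem.Int.band
  by_cases hy : 0 ≤ y
  · simp only [hy, if_true, show (0:Int) ≤ 255 by norm_num]
    rw [h255, h8]
    omega
  · simp only [hy, if_false, show (0:Int) ≤ 255 by norm_num, if_true]
    rw [h255, Nat.and_comm, h8]
    omega

-- A's double loop only depends on x mod 256 and matrix_value mod 256.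
theorem pv_loopA_mod (x mv : Int) : affineALoop x mv = affineALoop (x % 256) (mv % 256) := by
  unfold affineALoop
  apply PySem.List.foldl_congr_mem
  intro acc i hi
  rw [PySem.List.mem_pyRange_one] at hi
  refine congrArg (fun t : Int => PySem.Int.bor acc (t <<< i.toNat)) ?_
  apply PySem.List.foldl_congr_mem
  intro bit j hj
  rw [PySem.List.mem_pyRange_one] at hj
  have hk : (PySem.Int.mod (i + j) 8).toNat < 8 := by
    have h1 := PySem.Int.mod_lt (i + j) (b := 8) (by norm_num)
    have h2 := PySem.Int.mod_nonneg (i + j) (b := 8) (by norm_num)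
    omega
  have hjx : j.toNat < 8 := by omega
  rw [pv_shift_band_one_mod mv _ hk, pv_shift_band_one_mod x _ hjx]

-- Nat mirrors of the two loops (proof-side only).
def natLoopA (x mv : Nat) : Nat :=
  (List.range 8).foldl (fun result i =>
    result ||| (((List.range 8).foldl (fun bit j =>
      if (mv >>> ((i + j) % 8)) &&& 1 ≠ 0 then bit ^^^ ((x >>> j) &&& 1) else bit) 0) <<< i)) 0

def natLoopB (x m : Nat) : Nat :=
  (List.range 8).foldl (fun result i =>
    let mask := ((m >>> i) ||| (m <<< (8 - i))) &&& 255
    let p0 := x &&& mask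
    let p1 := p0 ^^^ (p0 >>> 4)
    let p2 := p1 ^^^ (p1 >>> 2)
    let p3 := p2 ^^^ (p2 >>> 1)
    result ||| ((p3 &&& 1) <<< i)) 0

-- Casting a fold over naturals embedded in Int.
def pvCastList (ln : List Nat) : List Int := ln.map (fun n : Nat => (n : Int))

theorem pv_foldl_cast (f : Int → Int → Int) (g : Nat → Nat → Nat) :
    ∀ (ln : List Nat), (∀ (acc j : Nat), j ∈ ln → f ↑acc ↑j = ↑(g acc j)) →
    ∀ (a : Nat) (ai : Int), ai = ↑a →
      List.foldl f ai (pvCastList ln) = ↑(List.foldl g a ln) := by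
  intro ln
  induction ln with
  | nil => intro _ a ai hai; simp [pvCastList, hai]
  | cons x xs ih =>
    intro h a ai hai
    rw [show pvCastList (x :: xs) = (x : Int) :: pvCastList xs from rfl, List.foldl_cons,
        List.foldl_cons, hai, h a x (by simp)]
    exact ih (fun acc j hj => h acc j (by simp [hj])) (g a x) _ rfl

theorem pv_cast_shiftRight (n k : Nat) : ((n : Int) >>> k) = ((n >>> k : Nat) : Int) := rfl

theorem pv_cast_shiftLeft (n k : Nat) : ((n : Int) <<< k) = ((n <<< k : Nat) : Int) := rfl

theorem pv_pyRange8 : PySem.List.pyRange 0 8 = pvCastList (List.range 8) := by decide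

-- A conditional XOR of one bit is an unconditional XOR of an AND of bits.
theorem pv_step (bit u v : Nat) :
    (if u &&& 1 ≠ 0 then bit ^^^ (v &&& 1) else bit) = bit ^^^ ((v &&& 1) &&& (u &&& 1)) := by
  simp only [Nat.and_one_is_mod]
  rcases Nat.mod_two_eq_zero_or_one u with h | h <;> rcases Nat.mod_two_eq_zero_or_one v with h' | h' <;>
    simp [h, h']

theorem pv_and_one_split (x y : Nat) : (x &&& y) &&& 1 = (x &&& 1) &&& (y &&& 1) := by
  apply Nat.eq_of_testBit_eq
  intro k
  simp only [Nat.testBit_and]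
  cases Nat.testBit 1 k <;> cases Nat.testBit x k <;> cases Nat.testBit y k <;> simp

-- Bit j of the rotated mask is bit (i+j)%8 of the byte b.
theorem pv_bit (x k : Nat) : (x >>> k) &&& 1 = if x.testBit k then 1 else 0 := by
  rw [Nat.and_one_is_mod]
  rcases Nat.mod_two_eq_zero_or_one (x >>> k) with h | h <;> rw [h] <;>
    simp [Nat.testBit, Nat.one_and_eq_mod_two, h]

theorem pv_maskbit (i j : Nat) (hi : i < 8) (hj : j < 8) (b : Nat) (hb : b < 256) :
    ((((b >>> i) ||| (b <<< (8 - i))) &&& 255) >>> j) &&& 1 = (b >>> ((i + j) % 8)) &&& 1 := by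
  rw [pv_bit, pv_bit]
  have hM : ((((b >>> i) ||| (b <<< (8 - i))) &&& 255)).testBit j = b.testBit ((i + j) % 8) := by
    rw [show (255 : Nat) = 2 ^ 8 - 1 from rfl]
    simp only [Nat.testBit_and, Nat.testBit_or, Nat.testBit_shiftRight, Nat.testBit_shiftLeft,
      Nat.testBit_two_pow_sub_one]
    by_cases hij : i + j < 8
    · have h1 : (i + j) % 8 = i + j := Nat.mod_eq_of_lt hij
      have h2 : ¬(8 - i ≤ j) := by omega
      simp [h1, h2, hj]
    · have h1 : (i + j) % 8 = i + j - 8 := by omega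
      have h2 : 8 - i ≤ j := by omega
      have h3 : j - (8 - i) = i + j - 8 := by omega
      have h4 : b.testBit (i + j) = false := by
        apply Nat.testBit_lt_two_pow
        calc b < 256 := hb
          _ ≤ 2 ^ (i + j) := by
              have h8 : 8 ≤ i + j := by omega
              calc (256 : Nat) = 2 ^ 8 := rfl
                _ ≤ 2 ^ (i + j) := Nat.pow_le_pow_right (by norm_num) h8
      simp [h1, h2, h3, h4, hj]
  rw [hM]

-- The xor-shift chain computes the parity (XOR of the 8 bits) of a byte.
set_option maxRecDepth 10000 in
theorem pv_parity_fold : ∀ t : Nat, t < 256 →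
    (let p1 := t ^^^ (t >>> 4)
     let p2 := p1 ^^^ (p1 >>> 2)
     let p3 := p2 ^^^ (p2 >>> 1)
     p3 &&& 1) = (List.range 8).foldl (fun bit j => bit ^^^ ((t >>> j) &&& 1)) 0 := by decide

-- For each output bit, A's conditional-XOR scan equals B's parity of (x AND rotated mask).
theorem pv_bitEq (a b i : Nat) (hb : b < 256) (hi : i < 8) :
    (List.range 8).foldl (fun bit j =>
        if (b >>> ((i + j) % 8)) &&& 1 ≠ 0 then bit ^^^ ((a >>> j) &&& 1) else bit) 0
    = (let mask := ((b >>> i) ||| (b <<< (8 - i))) &&& 255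
       let p0 := a &&& mask
       let p1 := p0 ^^^ (p0 >>> 4)
       let p2 := p1 ^^^ (p1 >>> 2)
       let p3 := p2 ^^^ (p2 >>> 1)
       p3 &&& 1) := by
  have hp0 : a &&& (((b >>> i) ||| (b <<< (8 - i))) &&& 255) < 256 :=
    lt_of_le_of_lt Nat.and_le_right (lt_of_le_of_lt Nat.and_le_right (by norm_num))
  show _ = (let p0 := a &&& (((b >>> i) ||| (b <<< (8 - i))) &&& 255)
            let p1 := p0 ^^^ (p0 >>> 4)
            let p2 := p1 ^^^ (p1 >>> 2)
            let p3 := p2 ^^^ (p2 >>> 1)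
            p3 &&& 1)
  rw [pv_parity_fold _ hp0]
  apply PySem.List.foldl_congr_mem
  intro bit j hj
  rw [List.mem_range] at hj
  rw [pv_step]
  congr 1
  conv_rhs => rw [Nat.shiftRight_and_distrib, pv_and_one_split, pv_maskbit i j hi hj b hb]

-- On bytes the two Nat loops agree.
theorem pv_keyNat (a b : Nat) (hb : b < 256) : natLoopA a b = natLoopB a b := by
  unfold natLoopA natLoopB
  apply PySem.List.foldl_congr_mem
  intro acc i hi
  rw [List.mem_range] at hi
  show acc ||| _ = acc ||| _
  congr 1
  congr 1
  exact pv_bitEq a b i hb hi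

-- Bridge: A's Int loop on byte casts is the Nat mirror.
theorem pv_bridgeA (a b : Nat) : affineALoop (a : Int) (b : Int) = ((natLoopA a b : Nat) : Int) := by
  unfold affineALoop natLoopA
  rw [pv_pyRange8]
  apply pv_foldl_cast _ _ (List.range 8) ?_ 0 0 (by norm_num)
  intro acc i hi
  rw [List.mem_range] at hi
  have hstep : ∀ (bit jn : Nat), jn ∈ List.range 8 →
      (fun (bit j : Int) =>
        if PySem.Int.band ((b : Int) >>> (PySem.Int.mod ((i : Int) + j) 8).toNat) 1 ≠ 0 then
          PySem.Int.bxor bit (PySem.Int.band ((a : Int) >>> j.toNat) 1)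
        else bit) (↑bit) (↑jn)
      = ↑((fun (bit j : Nat) =>
          if (b >>> ((i + j) % 8)) &&& 1 ≠ 0 then bit ^^^ ((a >>> j) &&& 1) else bit) bit jn) := by
    intro bit jn hjn
    rw [List.mem_range] at hjn
    have hmod : (PySem.Int.mod ((i : Int) + (jn : Int)) 8).toNat = (i + jn) % 8 := by
      have h1 : ((i : Int) + (jn : Int)) = (((i + jn : Nat) : Nat) : Int) := by push_cast; ring
      rw [h1, show (8 : Int) = ((8 : Nat) : Int) from rfl, PySem.Int.mod_natCast, Int.toNat_natCast]
    show (if PySem.Int.band ((b : Int) >>> (PySem.Int.mod ((i : Int) + (jn : Int)) 8).toNat) 1 ≠ 0 then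
          PySem.Int.bxor (↑bit) (PySem.Int.band ((a : Int) >>> ((jn : Int)).toNat) 1)
        else (↑bit : Int)) = _
    simp only [hmod, Int.toNat_natCast, pv_cast_shiftRight,
      show (1 : Int) = ((1 : Nat) : Int) from rfl, PySem.Int.band_natCast, PySem.Int.bxor_natCast,
      apply_ite (fun n : Nat => (n : Int)), ne_eq, Nat.cast_eq_zero]
  rw [pv_foldl_cast _ _ (List.range 8) hstep 0 0 (by norm_num)]
  simp only [Int.toNat_natCast, pv_cast_shiftLeft, PySem.Int.bor_natCast]

-- Bridge: B's Int loop on byte casts is the Nat mirror.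
theorem pv_bridgeB (a b : Nat) : affineAltLoop (a : Int) (b : Int) = ((natLoopB a b : Nat) : Int) := by
  unfold affineAltLoop natLoopB
  rw [pv_pyRange8]
  apply pv_foldl_cast _ _ (List.range 8) ?_ 0 0 (by norm_num)
  intro acc i hi
  rw [List.mem_range] at hi
  have h8i : ((8 : Int) - (i : Int)).toNat = 8 - i := by omega
  simp only [Int.toNat_natCast, h8i, Int.shiftRight_natCast, Int.shiftLeft_natCast,
    show (255 : Int) = ((255 : Nat) : Int) from rfl, show (1 : Int) = ((1 : Nat) : Int) from rfl,
    show (2 : Int) = ((2 : Nat) : Int) from rfl, show (4 : Int) = ((4 : Nat) : Int) from rfl,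
    PySem.Int.band_natCast, PySem.Int.bor_natCast, PySem.Int.bxor_natCast]

-- ===== VERDICT (by name: the statement is the Claim_ definition above) =====
theorem affine_transform_spec : Claim_equal_affine_transform := by
  intro x mv ac _
  unfold Spec_affine_transform affine_transform affine_transform_alt
  rw [pv_loopA_mod, pv_band_255, pv_band_255]
  have hxa : x % 256 = (((x % 256).toNat : Nat) : Int) := by omega
  have hmb : mv % 256 = (((mv % 256).toNat : Nat) : Int) := by omega
  rw [hxa, hmb, pv_bridgeA, pv_bridgeB, pv_keyNat _ _ (by omega)]
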